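-- pv_equiv track=rewrite | github.com/pypi-data/pypi-mirror-402 | packages/pygarble/pygarble-0.5.0-py3-none-any.whl/pygarble/strategies/pronounceability.py | _get_word_coda
-- ===== SOURCE A (Python) =====
-- VOWELS = set("aeiou")
--
-- CONSONANTS = set("bcdfghjklmnpqrstvwxyz")
--
-- def _get_word_coda(word: str) -> str:
--     """Get consonant cluster at end of word."""
--     coda = ""
--     for char in reversed(word.lower()):
--         if char in CONSONANTS:
--             coda = char + coda
--         elif char in VOWELS:
--             break
--         else:
--             break
--     return coda
-- ===== SOURCE B (Python) =====
-- CONSONANTS = set("bcdfghjklmnpqrstvwxyz")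
--
-- def _get_word_coda(word: str) -> str:
--     """Get consonant cluster at end of word."""
--     w = word.lower()
--     idx = 0
--     for i, ch in enumerate(w):
--         if ch not in CONSONANTS:
--             idx = i + 1
--     return w[idx:]
-- ===== Notes on version B (the rewrite author's own statement) =====
-- stated objective: alternative
-- what changed: Replaces the backward scan with break that builds the coda by string prepending with a single forward enumerate pass that tracks the index after the last non-consonant and returns one slice of the lowered word.
import Mathlib
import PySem

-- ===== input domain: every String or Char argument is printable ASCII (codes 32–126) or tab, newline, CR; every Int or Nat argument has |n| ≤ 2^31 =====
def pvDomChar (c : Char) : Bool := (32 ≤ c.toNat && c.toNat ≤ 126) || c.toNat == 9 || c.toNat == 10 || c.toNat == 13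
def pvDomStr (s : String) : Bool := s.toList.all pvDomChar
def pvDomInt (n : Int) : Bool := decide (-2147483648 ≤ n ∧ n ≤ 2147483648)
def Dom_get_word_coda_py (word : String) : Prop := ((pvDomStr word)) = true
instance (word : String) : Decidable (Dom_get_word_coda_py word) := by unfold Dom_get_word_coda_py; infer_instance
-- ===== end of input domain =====

-- B replaces A's backward scan-with-break (which prepends to a growing string) by a
-- single forward enumerate pass tracking the index after the last non-consonant,
-- followed by one slice; same return value on every input.

-- ===== PORT A =====
def pvVowels : PySem.Set Char := PySem.Set.ofList "aeiou".toList
def pvConsonants : PySem.Set Char := PySem.Set.ofList "bcdfghjklmnpqrstvwxyz".toList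

def pvCodaLoop : List Char → List Char → List Char
  | [], coda => coda
  | c :: rest, coda =>
    if PySem.Set.contains pvConsonants c then pvCodaLoop rest (c :: coda)
    else if PySem.Set.contains pvVowels c then coda
    else coda

def get_word_coda_py (word : String) : String :=
  String.ofList (pvCodaLoop (PySem.Str.lower word).toList.reverse [])

-- ===== PORT B =====
def pvConsonantsB : PySem.Set Char := PySem.Set.ofList "bcdfghjklmnpqrstvwxyz".toList

def get_word_coda_py_alt (word : String) : String :=
  let w := PySem.Str.lower word
  let idx : Int := (PySem.List.enumerate w.toList 0).foldl
    (fun idx p => if PySem.Set.contains pvConsonantsB p.2 then idx else p.1 + 1) 0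
  PySem.Str.slice w (some idx) none

-- ===== PRECONDITION & SPEC =====
def Spec_get_word_coda_py (word : String) (out : String) : Prop := out = get_word_coda_py_alt word
instance (word : String) (out : String) : Decidable (Spec_get_word_coda_py word out) := by unfold Spec_get_word_coda_py; infer_instance

-- ===== CLAIM (what is proved, stated in full; the proofs are below) =====
def Claim_equal_get_word_coda_py : Prop := ∀ (word : String), Dom_get_word_coda_py word → Spec_get_word_coda_py word (get_word_coda_py word)

-- ===== LEMMAS AND PROOFS =====

theorem pvCodaLoop_eq (r acc : List Char) :
    pvCodaLoop r acc = (r.takeWhile (fun c => PySem.Set.contains pvConsonants c)).reverse ++ acc := by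
  induction r generalizing acc with
  | nil => simp [pvCodaLoop]
  | cons c rest ih =>
    rw [pvCodaLoop, List.takeWhile_cons]
    by_cases h : PySem.Set.contains pvConsonants c
    · simp only [h, if_true, ih, List.reverse_cons, List.append_assoc, List.singleton_append]
    · simp only [h]
      simp

theorem pvFold_eq (l : List Char) (k : Nat) (s : Int) :
    (PySem.List.enumerate l (k : Int)).foldl
      (fun idx p => if PySem.Set.contains pvConsonantsB p.2 then idx else p.1 + 1) s =
    if l.all (fun c => PySem.Set.contains pvConsonants c) then s
    else ((k + (l.length - (l.reverse.takeWhile (fun c => PySem.Set.contains pvConsonants c)).length) : Nat) : Int) := by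
  induction l using List.reverseRecOn generalizing k s with
  | nil => simp [PySem.List.enumerate_nil]
  | append_singleton xs c ih =>
    rw [PySem.List.enumerate_append, List.foldl_append, ih, PySem.List.enumerate_cons,
      PySem.List.enumerate_nil]
    simp only [List.foldl_cons, List.foldl_nil, List.all_append, List.all_cons, List.all_nil,
      List.reverse_append, List.reverse_cons, List.reverse_nil, List.nil_append,
      List.singleton_append, List.takeWhile_cons, List.length_append, List.length_cons,
      List.length_nil]
    have hBC : pvConsonantsB = pvConsonants := rfl
    by_cases hc : PySem.Set.contains pvConsonants c
    · simp only [hBC, hc, if_true, Bool.and_true, List.length_cons]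
      by_cases ha : xs.all (fun c => PySem.Set.contains pvConsonants c)
      · simp
      · simp only [ha]
        congr 1
        omega
    · have hc' : PySem.Set.contains pvConsonants c = false := by simpa using hc
      rw [hBC, hc']
      simp only [Bool.and_true, Bool.and_false, Bool.false_eq_true, if_false, List.length_nil]
      push_cast
      omega

theorem pvTakeWhile_eq_take {α : Type} (p : α → Bool) (l : List α) :
    l.takeWhile p = l.take (l.takeWhile p).length := by
  induction l with
  | nil => rfl
  | cons c rest ih =>
    rw [List.takeWhile_cons]
    by_cases h : p c
    · simp only [h, if_true, List.length_cons, List.take_succ_cons]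
      rw [← ih]
    · simp [h]

theorem pvRevTakeWhile {α : Type} (p : α → Bool) (l : List α) :
    (l.reverse.takeWhile p).reverse = l.drop (l.length - (l.reverse.takeWhile p).length) := by
  conv_lhs => rw [pvTakeWhile_eq_take p l.reverse, List.take_reverse, List.reverse_reverse]

theorem pvFold_zero (l : List Char) :
    (PySem.List.enumerate l 0).foldl
      (fun idx p => if PySem.Set.contains pvConsonantsB p.2 then idx else p.1 + 1) 0 =
    if l.all (fun c => PySem.Set.contains pvConsonants c) then (0 : Int)
    else (((l.length - (l.reverse.takeWhile (fun c => PySem.Set.contains pvConsonants c)).length) : Nat) : Int) := by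
  have h := pvFold_eq l 0 0
  rw [Nat.cast_zero, Nat.zero_add] at h
  exact h

theorem get_word_coda_py_spec : Claim_equal_get_word_coda_py := by
  intro word _
  show get_word_coda_py word = get_word_coda_py_alt word
  simp only [get_word_coda_py, get_word_coda_py_alt]
  rw [pvCodaLoop_eq, List.append_nil, pvFold_zero]
  by_cases ha : (PySem.Str.lower word).toList.all (fun c => PySem.Set.contains pvConsonants c)
  · rw [if_pos ha]
    have ht : (PySem.Str.lower word).toList.reverse.takeWhile
        (fun c => PySem.Set.contains pvConsonants c) = (PySem.Str.lower word).toList.reverse := by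
      apply List.takeWhile_eq_self_iff.mpr
      intro a hma
      exact List.all_eq_true.mp ha a (List.mem_reverse.mp hma)
    rw [ht, List.reverse_reverse]
    apply String.toList_inj.mp
    simp [PySem.Str.toList_slice]
  · rw [if_neg ha]
    apply String.toList_inj.mp
    rw [String.toList_ofList, PySem.Str.toList_slice]
    simp only [PySem.Chars.slice_eq_listSlice, PySem.List.slice_from_natCast]
    exact pvRevTakeWhile _ _
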